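-- pv_equiv track=rewrite | github.com/Pythagoras001/Estructuras-Y-Algoritmos | 00-Training Camp 2024/Dia2/F - Mahmoud and a Triangle.py | trianguloValido
-- ===== SOURCE A (Python) =====
-- def trianguloValido(num, lista):
--     for i in range(num-1, 1, -1):
--         iz = 0
--         dere = i-1
--         top = i
--
--         while iz < dere:
--             if lista[dere] + lista[iz] > lista[top]:
--                 return 'YES'
--             else:
--                 iz += 1
--
--     return 'NO'
-- ===== SOURCE B (Python) =====
-- def trianguloValido(num, lista):
--     # Single ascending pass keeping the running maximum of lista[0..i-2]:
--     # A's inner scan only asks whether SOME earlier element j satisfies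
--     # lista[i-1] + lista[j] > lista[i], i.e. prefix-max + lista[i-1] > lista[i].
--     if num < 3:
--         return 'NO'
--     mx = lista[0]
--     for i in range(2, num):
--         if mx + lista[i-1] > lista[i]:
--             return 'YES'
--         mx = max(mx, lista[i-1])
--     return 'NO'
-- ===== Notes on version B (the rewrite author's own statement) =====
-- stated objective: alternative
-- what changed: A's descending double loop tests every pair (j, i-1) against lista[i]; B makes one ascending pass maintaining the running prefix maximum, since A's inner scan only asks whether max(lista[0..i-2]) + lista[i-1] > lista[i].
import Mathlib
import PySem

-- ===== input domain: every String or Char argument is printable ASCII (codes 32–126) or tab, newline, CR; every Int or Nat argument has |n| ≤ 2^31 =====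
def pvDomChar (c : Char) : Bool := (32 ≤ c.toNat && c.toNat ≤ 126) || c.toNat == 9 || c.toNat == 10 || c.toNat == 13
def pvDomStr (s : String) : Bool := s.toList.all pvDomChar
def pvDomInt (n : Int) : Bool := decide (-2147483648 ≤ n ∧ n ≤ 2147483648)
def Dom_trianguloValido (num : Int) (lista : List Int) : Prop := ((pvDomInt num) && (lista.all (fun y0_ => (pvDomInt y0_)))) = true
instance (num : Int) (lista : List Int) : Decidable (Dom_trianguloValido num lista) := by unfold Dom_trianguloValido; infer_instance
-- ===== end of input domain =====

-- B replaces A's double scan by one ascending pass keeping the running prefix maximum (objective: alternative).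

-- ===== PORT A =====
-- the 'while iz < dere' loop; fuel = (dere - iz).toNat iterations suffice since iz increases by 1
def pvInnerA (lista : List Int) (dere top : Int) : Nat → Int → Bool
  | 0, _ => false
  | fuel+1, iz =>
    if iz < dere then
      match PySem.List.pyGet? lista dere, PySem.List.pyGet? lista iz, PySem.List.pyGet? lista top with
      | some d, some z, some t => if d + z > t then true else pvInnerA lista dere top fuel (iz+1)
      | _, _, _ => false          -- IndexError: outside Pre_
    else false

-- the 'for i in range(num-1, 1, -1)' loop with early return
def pvOuterA (lista : List Int) : List Int → String
  | [] => "NO"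
  | i :: rest => if pvInnerA lista (i-1) i (i-1).toNat 0 then "YES" else pvOuterA lista rest

def trianguloValido (num : Int) (lista : List Int) : String :=
  pvOuterA lista (PySem.List.pyRange (num-1) 1 (-1))

-- ===== PORT B =====
-- the 'for i in range(2, num)' loop of Source B, carrying the running maximum mx
def pvAltLoop (lista : List Int) : List Int → Int → String
  | [], _ => "NO"
  | i :: rest, mx =>
    match PySem.List.pyGet? lista (i-1), PySem.List.pyGet? lista i with
    | some a, some b => if mx + a > b then "YES" else pvAltLoop lista rest (max mx a)
    | _, _ => "NO"               -- IndexError: outside Pre_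

def trianguloValido_alt (num : Int) (lista : List Int) : String :=
  if num < 3 then "NO"
  else
    match PySem.List.pyGet? lista 0 with
    | some m0 => pvAltLoop lista (PySem.List.pyRange 2 num 1) m0
    | none => "NO"               -- IndexError: outside Pre_

-- ===== PRECONDITION & SPEC =====
-- A raises IndexError exactly when 3 ≤ num and num > len(lista); those inputs are excluded.
def Pre_trianguloValido (num : Int) (lista : List Int) : Prop :=
  num ≤ 2 ∨ num ≤ (lista.length : Int)
instance (num : Int) (lista : List Int) : Decidable (Pre_trianguloValido num lista) := by
  unfold Pre_trianguloValido; infer_instance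

def pvWitness_trianguloValido : Int × List Int := (4, [3, 4, 5, 6])

def Spec_trianguloValido (num : Int) (lista : List Int) (out : String) : Prop := out = trianguloValido_alt num lista
instance (num : Int) (lista : List Int) (out : String) : Decidable (Spec_trianguloValido num lista out) := by unfold Spec_trianguloValido; infer_instance

-- ===== CLAIM (what is proved, stated in full; the proofs are below) =====
def Claim_equal_trianguloValido : Prop := ∀ (num : Int) (lista : List Int), Dom_trianguloValido num lista → Pre_trianguloValido num lista → Spec_trianguloValido num lista (trianguloValido num lista)

-- ===== LEMMAS AND PROOFS =====

-- abbreviation for in-range element access used by the characterisations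
def pvG (lista : List Int) (k : Int) : Int := PySem.List.pyGetD lista k 0

lemma pvGet?_eq_some_pvG (lista : List Int) (i : Int) (h0 : 0 ≤ i) (h1 : i < (lista.length : Int)) :
    PySem.List.pyGet? lista i = some (pvG lista i) := by
  rw [PySem.List.pyGet?_eq_some_getElem lista h0 h1, pvG,
    PySem.List.pyGetD_eq_getElem lista 0 h0 h1]

-- the triangle condition A's inner loop searches for at outer index i
def pvC (lista : List Int) (i : Int) : Prop :=
  ∃ j : Int, 0 ≤ j ∧ j < i - 1 ∧ pvG lista (i-1) + pvG lista j > pvG lista i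

lemma pvInnerA_yes (lista : List Int) (dere top : Int)
    (hd : dere < (lista.length : Int)) (ht0 : 0 ≤ top) (ht : top < (lista.length : Int)) :
    ∀ (fuel : Nat) (iz : Int), 0 ≤ iz → fuel = (dere - iz).toNat →
      (pvInnerA lista dere top fuel iz = true ↔
        ∃ j : Int, iz ≤ j ∧ j < dere ∧ pvG lista dere + pvG lista j > pvG lista top) := by
  intro fuel
  induction fuel with
  | zero =>
    intro iz h0 hf
    simp only [pvInnerA]
    constructor
    · intro h; exact absurd h (by simp)
    · rintro ⟨j, h1, h2, _⟩; exfalso; omega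
  | succ n ih =>
    intro iz h0 hf
    have hlt : iz < dere := by omega
    simp only [pvInnerA, if_pos hlt]
    rw [pvGet?_eq_some_pvG lista dere (by omega) hd,
        pvGet?_eq_some_pvG lista iz h0 (by omega),
        pvGet?_eq_some_pvG lista top ht0 ht]
    by_cases hc : pvG lista dere + pvG lista iz > pvG lista top
    · simp only [if_pos hc]
      constructor
      · intro _; exact ⟨iz, le_refl _, hlt, hc⟩
      · intro _; trivial
    · simp only [if_neg hc]
      rw [ih (iz+1) (by omega) (by omega)]
      constructor
      · rintro ⟨j, h1, h2, h3⟩; exact ⟨j, by omega, h2, h3⟩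
      · rintro ⟨j, h1, h2, h3⟩
        refine ⟨j, ?_, h2, h3⟩
        rcases eq_or_lt_of_le h1 with h | h
        · exfalso; rw [← h] at h3; exact hc h3
        · omega

lemma pvOuterA_mem (lista : List Int) (L : List Int) :
    pvOuterA lista L = "YES" ∨ pvOuterA lista L = "NO" := by
  induction L with
  | nil => right; rfl
  | cons i rest ih =>
    simp only [pvOuterA]
    split_ifs with h
    · left; rfl
    · exact ih

lemma pvAltLoop_mem (lista : List Int) (L : List Int) :
    ∀ mx : Int, pvAltLoop lista L mx = "YES" ∨ pvAltLoop lista L mx = "NO" := by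
  induction L with
  | nil => intro mx; right; rfl
  | cons i rest ih =>
    intro mx
    simp only [pvAltLoop]
    rcases hg1 : PySem.List.pyGet? lista (i-1) with _ | a
    · right; rfl
    · rcases hg2 : PySem.List.pyGet? lista i with _ | b
      · right; rfl
      · dsimp only
        split_ifs with h
        · left; rfl
        · exact ih (max mx a)

lemma pvOuterA_yes (lista : List Int) :
    ∀ (n : Nat) (a : Int), (a - 1).toNat = n → a < (lista.length : Int) →
      (pvOuterA lista (PySem.List.pyRange a 1 (-1)) = "YES" ↔
        ∃ i : Int, 2 ≤ i ∧ i ≤ a ∧ pvC lista i) := by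
  intro n
  induction n with
  | zero =>
    intro a hn ha
    rw [PySem.List.pyRange_neg_one_eq_nil (by omega)]
    simp only [pvOuterA]
    constructor
    · intro h; exact absurd h (by simp)
    · rintro ⟨i, h1, h2, _⟩; exfalso; omega
  | succ n ih =>
    intro a hn ha
    have h2a : 2 ≤ a := by omega
    rw [PySem.List.pyRange_neg_one_cons (by omega : (1:Int) < a)]
    simp only [pvOuterA]
    have hinner := pvInnerA_yes lista (a-1) a (by omega) (by omega) ha
      ((a-1).toNat) 0 (le_refl _) (by omega)
    by_cases hI : pvInnerA lista (a-1) a (a-1).toNat 0 = true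
    · simp only [if_pos hI]
      rcases hinner.mp hI with ⟨j, hj0, hj1, hj2⟩
      constructor
      · intro _; exact ⟨a, h2a, le_refl _, ⟨j, hj0, hj1, hj2⟩⟩
      · intro _; trivial
    · simp only [if_neg hI]
      have hn' : ((a-1) - 1).toNat = n := by clear hinner hI; omega
      have ha' : a - 1 < (lista.length : Int) := by clear hinner hI; omega
      rw [ih (a-1) hn' ha']
      constructor
      · rintro ⟨i, h1, h2, h3⟩; exact ⟨i, h1, by omega, h3⟩
      · rintro ⟨i, h1, h2, h3⟩
        rcases eq_or_lt_of_le h2 with h | h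
        · exfalso
          apply hI
          apply hinner.mpr
          subst h
          rcases h3 with ⟨j, hj0, hj1, hj2⟩
          exact ⟨j, hj0, hj1, hj2⟩
        · exact ⟨i, h1, by omega, h3⟩

lemma pvAltLoop_yes (lista : List Int) (num : Int) (hlen : num ≤ (lista.length : Int)) :
    ∀ (n : Nat) (i mx : Int), (num - i).toNat = n → 2 ≤ i →
      (∀ j : Int, 0 ≤ j → j < i - 1 → pvG lista j ≤ mx) →
      (∃ j : Int, 0 ≤ j ∧ j < i - 1 ∧ pvG lista j = mx) →
      (pvAltLoop lista (PySem.List.pyRange i num 1) mx = "YES" ↔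
        ∃ i' : Int, i ≤ i' ∧ i' < num ∧ pvC lista i') := by
  intro n
  induction n with
  | zero =>
    intro i mx hn hi hub hwit
    rw [PySem.List.pyRange_one_eq_nil (by omega)]
    simp only [pvAltLoop]
    constructor
    · intro h; exact absurd h (by simp)
    · rintro ⟨i', h1, h2, _⟩; exfalso; omega
  | succ n ih =>
    intro i mx hn hi hub hwit
    have hilt : i < num := by omega
    rw [PySem.List.pyRange_one_cons (by omega : i < num)]
    simp only [pvAltLoop]
    rw [pvGet?_eq_some_pvG lista (i-1) (by omega) (by omega),
        pvGet?_eq_some_pvG lista i (by omega) (by omega)]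
    dsimp only
    by_cases hc : mx + pvG lista (i-1) > pvG lista i
    · simp only [if_pos hc]
      constructor
      · intro _
        rcases hwit with ⟨j, hj0, hj1, hj2⟩
        exact ⟨i, le_refl _, hilt, ⟨j, hj0, hj1, by rw [hj2]; omega⟩⟩
      · intro _; trivial
    · simp only [if_neg hc]
      have hub' : ∀ j : Int, 0 ≤ j → j < (i+1) - 1 → pvG lista j ≤ max mx (pvG lista (i-1)) := by
        intro j hj0 hj1
        rcases lt_or_ge j (i-1) with h | h
        · exact le_trans (hub j hj0 h) (le_max_left _ _)
        · have hje : j = i - 1 := by omega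
          rw [hje]; exact le_max_right _ _
      have hwit' : ∃ j : Int, 0 ≤ j ∧ j < (i+1) - 1 ∧ pvG lista j = max mx (pvG lista (i-1)) := by
        rcases lt_or_ge mx (pvG lista (i-1)) with h | h
        · exact ⟨i-1, by omega, by omega, (max_eq_right (le_of_lt h)).symm⟩
        · rcases hwit with ⟨j, hj0, hj1, hj2⟩
          exact ⟨j, hj0, by omega, by rw [hj2]; exact (max_eq_left h).symm⟩
      have hn' : (num - (i+1)).toNat = n := by omega
      have hi' : (2:Int) ≤ i + 1 := by omega
      rw [ih (i+1) (max mx (pvG lista (i-1))) hn' hi' hub' hwit']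
      constructor
      · rintro ⟨i', h1, h2, h3⟩; exact ⟨i', by omega, h2, h3⟩
      · rintro ⟨i', h1, h2, h3⟩
        rcases eq_or_lt_of_le h1 with h | h
        · exfalso
          subst h
          rcases h3 with ⟨j, hj0, hj1, hj2⟩
          have := hub j hj0 hj1
          omega
        · exact ⟨i', by omega, h2, h3⟩

-- ===== VERDICT (by name: the statement is the Claim_ definition above) =====
theorem trianguloValido_spec : Claim_equal_trianguloValido := by
  intro num lista _ pre
  unfold Spec_trianguloValido trianguloValido trianguloValido_alt
  by_cases hn : num ≤ 2
  · rw [PySem.List.pyRange_neg_one_eq_nil (by omega), if_pos (by omega)]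
    rfl
  · have hlen : num ≤ (lista.length : Int) := by
      rcases pre with h | h
      · exact absurd h hn
      · exact h
    rw [if_neg (by omega)]
    rw [pvGet?_eq_some_pvG lista 0 (le_refl _) (by omega)]
    show pvOuterA lista (PySem.List.pyRange (num-1) 1 (-1)) = pvAltLoop lista (PySem.List.pyRange 2 num 1) (pvG lista 0)
    have hA := pvOuterA_yes lista ((num - 2).toNat) (num - 1) (by omega) (by omega)
    have hB := pvAltLoop_yes lista num hlen ((num - 2).toNat) 2 (pvG lista 0)
      (by omega) (le_refl _)
      (by
        intro j hj0 hj1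
        have hje : j = 0 := by omega
        subst hje
        exact le_refl _)
      ⟨0, le_refl _, by omega, rfl⟩
    by_cases hP : ∃ i : Int, 2 ≤ i ∧ i ≤ num - 1 ∧ pvC lista i
    · rw [hA.mpr hP, hB.mpr ?_]
      rcases hP with ⟨i, h1, h2, h3⟩
      exact ⟨i, h1, by omega, h3⟩
    · have hA' : pvOuterA lista (PySem.List.pyRange (num-1) 1 (-1)) = "NO" := by
        rcases pvOuterA_mem lista (PySem.List.pyRange (num-1) 1 (-1)) with h | h
        · exact absurd (hA.mp h) hP
        · exact h
      have hB' : pvAltLoop lista (PySem.List.pyRange 2 num 1) (pvG lista 0) = "NO" := by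
        rcases pvAltLoop_mem lista (PySem.List.pyRange 2 num 1) (pvG lista 0) with h | h
        · exfalso
          rcases hB.mp h with ⟨i, h1, h2, h3⟩
          exact hP ⟨i, h1, by omega, h3⟩
        · exact h
      rw [hA', hB']
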